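-- pv_equiv track=rewrite | github.com/pypi-data/pypi-mirror-398 | packages/sys-scan-agent/sys_scan_agent-7.0.0-py3-none-any.whl/sys_scan_agent/graph/base.py | determine_qualitative_risk
-- ===== SOURCE A (Python) =====
-- from typing import Any, Dict, List, Optional, Set, Tuple, TYPE_CHECKING
--
-- def determine_qualitative_risk(sev_counters: Dict[str, int]) -> str:
--     """Determine overall qualitative risk level from severity counts.
--
--     Args:
--         sev_counters: Dictionary of severity counts
--
--     Returns:
--         Qualitative risk level string
--     """
--     qualitative = 'info'
--     order = ['critical', 'high', 'medium', 'low', 'info']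
--     for level in order:
--         if sev_counters.get(level):
--             qualitative = level
--             break
--     return qualitative
-- ===== SOURCE B (Python) =====
-- def determine_qualitative_risk(sev_counters):
--     """Determine overall qualitative risk level from severity counts."""
--     rank = {'critical': 4, 'high': 3, 'medium': 2, 'low': 1, 'info': 0}
--     names = {4: 'critical', 3: 'high', 2: 'medium', 1: 'low', 0: 'info'}
--     best = -1
--     for level, count in sev_counters.items():
--         if count:
--             best = max(best, rank.get(level, -1))
--     return names.get(best, 'info')
-- ===== Notes on version B (the rewrite author's own statement) =====
-- stated objective: alternative
-- what changed: B makes a single pass over the dict's own entries, keeping a running maximum numeric rank of the truthy known levels, and maps the final rank back to a name; A instead probes the five levels in fixed priority order against the dict and stops at the first truthy one.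
import Mathlib
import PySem

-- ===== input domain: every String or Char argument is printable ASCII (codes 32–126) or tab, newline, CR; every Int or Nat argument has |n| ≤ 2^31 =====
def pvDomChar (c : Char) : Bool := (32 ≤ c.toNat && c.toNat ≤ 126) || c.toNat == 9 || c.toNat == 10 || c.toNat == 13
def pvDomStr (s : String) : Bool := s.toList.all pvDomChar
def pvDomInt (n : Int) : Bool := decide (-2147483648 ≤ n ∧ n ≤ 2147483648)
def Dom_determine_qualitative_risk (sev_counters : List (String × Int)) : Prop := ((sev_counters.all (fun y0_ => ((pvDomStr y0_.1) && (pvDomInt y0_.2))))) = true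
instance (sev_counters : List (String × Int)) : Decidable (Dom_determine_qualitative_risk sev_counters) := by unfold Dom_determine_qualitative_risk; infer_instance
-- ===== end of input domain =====

-- B replaces A's fixed-priority probe of the five levels by one pass over the dict's own
-- entries keeping a running maximum numeric rank, mapped back to a name (alternative
-- decomposition, no speed claim).

-- ===== PORT A =====
-- Python truthiness of dict.get(level) (None/0 falsy, any nonzero int truthy)
def pvTruthy (o : Option Int) : Bool :=
  match o with
  | some n => n != 0
  | none => false

-- the for-loop with break: first truthy level wins, else the initial 'info'
def pvLoopA (d : PySem.Dict String Int) : List String → String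
  | [] => "info"
  | l :: rest => if pvTruthy (d.get? l) then l else pvLoopA d rest

def determine_qualitative_risk (sev_counters : List (String × Int)) : String :=
  pvLoopA (PySem.Dict.mk sev_counters) ["critical", "high", "medium", "low", "info"]

-- ===== PORT B =====
def pvRank : PySem.Dict String Int :=
  PySem.Dict.mk [("critical", 4), ("high", 3), ("medium", 2), ("low", 1), ("info", 0)]

def pvNames : PySem.Dict Int String :=
  PySem.Dict.mk [(4, "critical"), (3, "high"), (2, "medium"), (1, "low"), (0, "info")]

-- loop body: if count: best = max(best, rank.get(level, -1))
def pvStep (best : Int) (p : String × Int) : Int :=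
  if p.2 != 0 then max best (pvRank.getD p.1 (-1)) else best

def determine_qualitative_risk_alt (sev_counters : List (String × Int)) : String :=
  let best := (PySem.Dict.mk sev_counters).items.foldl pvStep (-1)
  pvNames.getD best "info"

-- ===== PRECONDITION & SPEC =====
-- The Python parameter is a dict; Pre_ says the association list really encodes one
-- (pairwise-distinct keys). It excludes no realizable Python input.
def Pre_determine_qualitative_risk (sev_counters : List (String × Int)) : Prop :=
  (sev_counters.map Prod.fst).Nodup
instance (sev_counters : List (String × Int)) : Decidable (Pre_determine_qualitative_risk sev_counters) := by unfold Pre_determine_qualitative_risk; infer_instance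

def pvWitness_determine_qualitative_risk : (List (String × Int)) := [("high", 2), ("low", 0)]

def Spec_determine_qualitative_risk (sev_counters : List (String × Int)) (out : String) : Prop := out = determine_qualitative_risk_alt sev_counters
instance (sev_counters : List (String × Int)) (out : String) : Decidable (Spec_determine_qualitative_risk sev_counters out) := by unfold Spec_determine_qualitative_risk; infer_instance

-- ===== CLAIM (what is proved, stated in full; the proofs are below) =====
def Claim_equal_determine_qualitative_risk : Prop := ∀ (sev_counters : List (String × Int)), Dom_determine_qualitative_risk sev_counters → Pre_determine_qualitative_risk sev_counters → Spec_determine_qualitative_risk sev_counters (determine_qualitative_risk sev_counters)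

-- ===== LEMMAS AND PROOFS =====

-- 'level has a truthy count somewhere in the raw list'
def pvAny (xs : List (String × Int)) (k : String) : Bool :=
  xs.any (fun p => p.1 == k && p.2 != 0)

-- value of B's accumulator as a function of the five presence bits
def pvVal (c h m l i : Bool) : Int :=
  if c then 4 else if h then 3 else if m then 2 else if l then 1 else if i then 0 else -1

-- value of A as a function of the five presence bits
def pvPick (c h m l i : Bool) : String :=
  if c then "critical" else if h then "high" else if m then "medium"
  else if l then "low" else if i then "info" else "info"

theorem pvVal_ge (c h m l i : Bool) : -1 ≤ pvVal c h m l i := by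
  cases c <;> cases h <;> cases m <;> cases l <;> cases i <;> decide

theorem pvTruthy_get (xs : List (String × Int)) (k : String)
    (h : (xs.map Prod.fst).Nodup) :
    pvTruthy ((PySem.Dict.mk xs).get? k) = pvAny xs k := by
  induction xs with
  | nil => rfl
  | cons p rest ih =>
    rw [List.map_cons, List.nodup_cons] at h
    obtain ⟨hk, hrest⟩ := h
    rw [PySem.Dict.get?_mk_cons]
    by_cases he : p.1 = k
    · have e : (p.1 == k) = true := by simp [he]
      have hrf : pvAny rest k = false := by
        simp only [pvAny, List.any_eq_false]
        intro q hq
        have hne : q.1 ≠ k := by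
          intro hqe
          apply hk
          rw [he, ← hqe]
          exact List.mem_map_of_mem hq
        simp [hne]
      simp only [pvAny, List.any_cons, e, Bool.true_and, if_true, pvTruthy]
      simp only [pvAny] at hrf
      rw [hrf, Bool.or_false]
    · have e : (p.1 == k) = false := by simp [he]
      simp only [e, Bool.false_eq_true, if_false, pvAny, List.any_cons, Bool.false_and,
        Bool.false_or]
      simp only [pvAny] at ih
      exact ih hrest

theorem pvRank_getD (k : String) :
    pvRank.getD k (-1) =
      if k == "critical" then 4 else if k == "high" then 3 else if k == "medium" then 2
      else if k == "low" then 1 else if k == "info" then 0 else -1 := by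
  by_cases h1 : k = "critical"
  · rw [h1]; decide
  by_cases h2 : k = "high"
  · rw [h2]; decide
  by_cases h3 : k = "medium"
  · rw [h3]; decide
  by_cases h4 : k = "low"
  · rw [h4]; decide
  by_cases h5 : k = "info"
  · rw [h5]; decide
  have f1 : ("critical" == k) = false := beq_eq_false_iff_ne.mpr (Ne.symm h1)
  have f2 : ("high" == k) = false := beq_eq_false_iff_ne.mpr (Ne.symm h2)
  have f3 : ("medium" == k) = false := beq_eq_false_iff_ne.mpr (Ne.symm h3)
  have f4 : ("low" == k) = false := beq_eq_false_iff_ne.mpr (Ne.symm h4)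
  have f5 : ("info" == k) = false := beq_eq_false_iff_ne.mpr (Ne.symm h5)
  have g1 : (k == "critical") = false := beq_eq_false_iff_ne.mpr h1
  have g2 : (k == "high") = false := beq_eq_false_iff_ne.mpr h2
  have g3 : (k == "medium") = false := beq_eq_false_iff_ne.mpr h3
  have g4 : (k == "low") = false := beq_eq_false_iff_ne.mpr h4
  have g5 : (k == "info") = false := beq_eq_false_iff_ne.mpr h5
  simp only [pvRank, PySem.Dict.getD_eq_get?_getD, PySem.Dict.get?_mk_cons,
    f1, f2, f3, f4, f5, g1, g2, g3, g4, g5, Bool.false_eq_true, if_false]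
  rfl

theorem pvStep_ge (b : Int) (p : String × Int) (h : -1 ≤ b) : -1 ≤ pvStep b p := by
  unfold pvStep
  split
  · exact le_trans h (le_max_left _ _)
  · exact h

theorem pvFoldl_char (xs : List (String × Int)) :
    ∀ b : Int, -1 ≤ b →
      xs.foldl pvStep b =
        max b (pvVal (pvAny xs "critical") (pvAny xs "high") (pvAny xs "medium")
          (pvAny xs "low") (pvAny xs "info")) := by
  induction xs with
  | nil =>
    intro b hb
    simp only [List.foldl_nil, pvAny, List.any_nil]
    exact (max_eq_left (by rw [show pvVal false false false false false = -1 from rfl]; exact hb)).symm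
  | cons p rest ih =>
    intro b hb
    rw [List.foldl_cons, ih (pvStep b p) (pvStep_ge b p hb)]
    have hany : ∀ k, pvAny (p :: rest) k = ((p.1 == k && p.2 != 0) || pvAny rest k) := by
      intro k; simp [pvAny]
    rw [hany, hany, hany, hany, hany]
    generalize pvAny rest "critical" = bc
    generalize pvAny rest "high" = bh
    generalize pvAny rest "medium" = bm
    generalize pvAny rest "low" = bl
    generalize pvAny rest "info" = bi
    by_cases hv : p.2 = 0
    · have hv0 : (p.2 != 0) = false := by simp [hv]
      simp [pvStep, hv0]
    · have hv1 : (p.2 != 0) = true := by simp [hv]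
      simp only [pvStep, hv1, if_true, Bool.and_true, pvRank_getD]
      by_cases h1 : p.1 = "critical"
      · rw [h1]
        have hy : pvVal ((("critical" : String) == "critical") || bc) ((("critical" : String) == "high") || bh)
            ((("critical" : String) == "medium") || bm) ((("critical" : String) == "low") || bl)
            ((("critical" : String) == "info") || bi) = max 4 (pvVal bc bh bm bl bi) := by
          cases bc <;> cases bh <;> cases bm <;> cases bl <;> cases bi <;> decide
        rw [hy, show (if (("critical" : String) == "critical") = true then (4 : Int)
            else if (("critical" : String) == "high") = true then 3
            else if (("critical" : String) == "medium") = true then 2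
            else if (("critical" : String) == "low") = true then 1
            else if (("critical" : String) == "info") = true then 0 else -1) = 4 from rfl]
        exact max_assoc b 4 _
      by_cases h2 : p.1 = "high"
      · rw [h2]
        have hy : pvVal ((("high" : String) == "critical") || bc) ((("high" : String) == "high") || bh)
            ((("high" : String) == "medium") || bm) ((("high" : String) == "low") || bl)
            ((("high" : String) == "info") || bi) = max 3 (pvVal bc bh bm bl bi) := by
          cases bc <;> cases bh <;> cases bm <;> cases bl <;> cases bi <;> decide
        rw [hy, show (if (("high" : String) == "critical") = true then (4 : Int)
            else if (("high" : String) == "high") = true then 3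
            else if (("high" : String) == "medium") = true then 2
            else if (("high" : String) == "low") = true then 1
            else if (("high" : String) == "info") = true then 0 else -1) = 3 from rfl]
        exact max_assoc b 3 _
      by_cases h3 : p.1 = "medium"
      · rw [h3]
        have hy : pvVal ((("medium" : String) == "critical") || bc) ((("medium" : String) == "high") || bh)
            ((("medium" : String) == "medium") || bm) ((("medium" : String) == "low") || bl)
            ((("medium" : String) == "info") || bi) = max 2 (pvVal bc bh bm bl bi) := by
          cases bc <;> cases bh <;> cases bm <;> cases bl <;> cases bi <;> decide
        rw [hy, show (if (("medium" : String) == "critical") = true then (4 : Int)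
            else if (("medium" : String) == "high") = true then 3
            else if (("medium" : String) == "medium") = true then 2
            else if (("medium" : String) == "low") = true then 1
            else if (("medium" : String) == "info") = true then 0 else -1) = 2 from rfl]
        exact max_assoc b 2 _
      by_cases h4 : p.1 = "low"
      · rw [h4]
        have hy : pvVal ((("low" : String) == "critical") || bc) ((("low" : String) == "high") || bh)
            ((("low" : String) == "medium") || bm) ((("low" : String) == "low") || bl)
            ((("low" : String) == "info") || bi) = max 1 (pvVal bc bh bm bl bi) := by
          cases bc <;> cases bh <;> cases bm <;> cases bl <;> cases bi <;> decide
        rw [hy, show (if (("low" : String) == "critical") = true then (4 : Int)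
            else if (("low" : String) == "high") = true then 3
            else if (("low" : String) == "medium") = true then 2
            else if (("low" : String) == "low") = true then 1
            else if (("low" : String) == "info") = true then 0 else -1) = 1 from rfl]
        exact max_assoc b 1 _
      by_cases h5 : p.1 = "info"
      · rw [h5]
        have hy : pvVal ((("info" : String) == "critical") || bc) ((("info" : String) == "high") || bh)
            ((("info" : String) == "medium") || bm) ((("info" : String) == "low") || bl)
            ((("info" : String) == "info") || bi) = max 0 (pvVal bc bh bm bl bi) := by
          cases bc <;> cases bh <;> cases bm <;> cases bl <;> cases bi <;> decide
        rw [hy, show (if (("info" : String) == "critical") = true then (4 : Int)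
            else if (("info" : String) == "high") = true then 3
            else if (("info" : String) == "medium") = true then 2
            else if (("info" : String) == "low") = true then 1
            else if (("info" : String) == "info") = true then 0 else -1) = 0 from rfl]
        exact max_assoc b 0 _
      · have g1 : (p.1 == "critical") = false := beq_eq_false_iff_ne.mpr h1
        have g2 : (p.1 == "high") = false := beq_eq_false_iff_ne.mpr h2
        have g3 : (p.1 == "medium") = false := beq_eq_false_iff_ne.mpr h3
        have g4 : (p.1 == "low") = false := beq_eq_false_iff_ne.mpr h4
        have g5 : (p.1 == "info") = false := beq_eq_false_iff_ne.mpr h5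
        simp only [g1, g2, g3, g4, g5, Bool.false_eq_true, if_false, Bool.false_or]
        rw [max_eq_left hb]

theorem pvLoopA_eq_pick (d : PySem.Dict String Int) :
    pvLoopA d ["critical", "high", "medium", "low", "info"]
      = pvPick (pvTruthy (d.get? "critical")) (pvTruthy (d.get? "high"))
          (pvTruthy (d.get? "medium")) (pvTruthy (d.get? "low")) (pvTruthy (d.get? "info")) := by
  simp only [pvLoopA, pvPick]

theorem pvNames_pvVal (c h m l i : Bool) :
    pvNames.getD (pvVal c h m l i) "info" = pvPick c h m l i := by
  cases c <;> cases h <;> cases m <;> cases l <;> cases i <;> decide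

-- ===== VERDICT (by name: the statement is the Claim_ definition above) =====
theorem determine_qualitative_risk_spec : Claim_equal_determine_qualitative_risk := by
  intro xs _ hpre
  unfold Spec_determine_qualitative_risk determine_qualitative_risk determine_qualitative_risk_alt
  have hitems : (PySem.Dict.mk xs).items = xs := rfl
  rw [pvLoopA_eq_pick, hitems, pvFoldl_char xs (-1) (le_refl _),
    pvTruthy_get xs _ hpre, pvTruthy_get xs _ hpre, pvTruthy_get xs _ hpre,
    pvTruthy_get xs _ hpre, pvTruthy_get xs _ hpre,
    max_eq_right (pvVal_ge _ _ _ _ _), pvNames_pvVal]
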